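-- pv_equiv track=rewrite | github.com/JoeLove100/leet-code | may_thirty_day_challenge/day_17.py | get_all_anagram_positions
-- ===== SOURCE A (Python) =====
-- from typing import List
-- from collections import Counter
--
-- def get_all_anagram_positions(text: str,
--                               pattern: str) -> List[int]:
--
--     positions = []
--
--     if len(text) < len(pattern) or not pattern:
--         return positions
--
--     start = 0
--     end = len(pattern) - 1
--
--     pattern_counter = Counter(pattern)
--     current_counter = Counter(text[start: end + 1])
--
--     while True:
--         if pattern_counter == current_counter:
--             positions.append(start)
--
--         current_counter[text[start]] -= 1
--         if current_counter[text[start]] == 0: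
--             current_counter.pop(text[start])
--
--         start += 1
--         end += 1
--
--         if end >= len(text):
--             return positions
--         elif text[end] in current_counter:
--             current_counter[text[end]] += 1
--         else:
--             current_counter[text[end]] = 1
-- ===== SOURCE B (Python) =====
-- def get_all_anagram_positions(text: str, pattern: str):
--     if not pattern:
--         return []
--     key = sorted(pattern)
--     m = len(pattern)
--     return [i for i in range(len(text) - m + 1) if sorted(text[i:i + m]) == key]
-- ===== Notes on version B (the rewrite author's own statement) =====
-- stated objective: simpler
-- what changed: A maintains an incrementally repaired sliding Counter across window positions; B keeps no state at all and independently re-checks each window by comparing sorted(window) to the pre-sorted pattern, with an explicit empty-pattern guard.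
import Mathlib
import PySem

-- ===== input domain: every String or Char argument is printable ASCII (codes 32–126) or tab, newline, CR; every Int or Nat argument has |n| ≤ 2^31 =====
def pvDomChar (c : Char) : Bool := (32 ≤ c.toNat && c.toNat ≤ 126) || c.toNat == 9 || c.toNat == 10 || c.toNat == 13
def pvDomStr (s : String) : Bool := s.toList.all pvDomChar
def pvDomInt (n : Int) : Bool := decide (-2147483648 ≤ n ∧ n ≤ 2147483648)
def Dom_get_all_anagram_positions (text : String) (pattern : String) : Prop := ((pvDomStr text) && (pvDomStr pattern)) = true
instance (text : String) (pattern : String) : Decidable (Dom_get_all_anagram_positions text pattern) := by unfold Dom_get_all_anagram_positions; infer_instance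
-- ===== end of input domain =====

-- B replaces A's incrementally-repaired sliding Counter by a stateless rescan: each window is
-- compared to the pattern via sorted() from scratch (objective: simpler; not faster).

-- ===== PORT A =====
-- Python's `Counter == Counter` is dict equality: same key→value mapping, insertion order ignored.
def pvDictEq (d1 d2 : PySem.Dict Char Int) : Bool :=
  d1.keys.all (fun k => d2.get? k == d1.get? k) && d2.keys.all (fun k => d1.get? k == d2.get? k)

-- the `while True` loop of A; `start`/`endi` are always in range when `t.getD` is used,
-- so `List.getD` with a dummy default is exactly Python's text[start] / text[end] here.
def pvLoopA (t : List Char) (pc : PySem.Dict Char Int) (cur : PySem.Dict Char Int)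
    (start : Nat) (endi : Nat) (positions : List Int) : List Int :=
  let positions' := if pvDictEq pc cur then positions ++ [(start : Int)] else positions
  let c := t.getD start ' '
  let cur1 := cur.modify c 0 (· - 1)                                  -- current_counter[text[start]] -= 1
  let cur2 := if cur1.getD c 0 == 0 then cur1.erase c else cur1      -- pop if it hit 0
  if h : t.length ≤ endi + 1 then positions'
  else
    let c2 := t.getD (endi + 1) ' '
    let cur3 := if cur2.contains c2 then cur2.modify c2 0 (· + 1) else cur2.insert c2 1
    pvLoopA t pc cur3 (start + 1) (endi + 1) positions'
termination_by t.length - endi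
decreasing_by omega

def get_all_anagram_positions (text : String) (pattern : String) : List Int :=
  let t := text.toList
  let p := pattern.toList
  let positions : List Int := []
  if t.length < p.length ∨ p = [] then positions
  else
    pvLoopA t (PySem.Dict.counter p)
      (PySem.Dict.counter (PySem.List.slice t (some 0) (some (((p.length : Int) - 1) + 1))))
      0 (p.length - 1) positions

-- ===== PORT B =====
def get_all_anagram_positions_alt (text : String) (pattern : String) : List Int :=
  let p := pattern.toList
  if p = [] then []
  else
    let t := text.toList
    let key := PySem.List.sorted p (fun x => x) false
    let m := p.length
    (PySem.List.pyRange 0 ((t.length : Int) - (m : Int) + 1)).filter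
      (fun i => decide (PySem.List.sorted (PySem.List.slice t (some i) (some (i + (m : Int)))) (fun x => x) false = key))

-- ===== PRECONDITION & SPEC =====
def Spec_get_all_anagram_positions (text : String) (pattern : String) (out : List Int) : Prop := out = get_all_anagram_positions_alt text pattern
instance (text : String) (pattern : String) (out : List Int) : Decidable (Spec_get_all_anagram_positions text pattern out) := by unfold Spec_get_all_anagram_positions; infer_instance

-- ===== CLAIM (what is proved, stated in full; the proofs are below) =====
def Claim_equal_get_all_anagram_positions : Prop := ∀ (text : String) (pattern : String), Dom_get_all_anagram_positions text pattern → Spec_get_all_anagram_positions text pattern (get_all_anagram_positions text pattern)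

-- ===== LEMMAS AND PROOFS =====

-- the window text[j : j+m] as a list
def pvWin (t : List Char) (j m : Nat) : List Char := (t.drop j).take m

-- the per-index test both programs implement
def pvPred (t p : List Char) (j : Nat) : Bool := decide ((pvWin t j p.length).Perm p)

-- invariant tying A's counter dict to the multiset of the current window
def pvCInv (d : PySem.Dict Char Int) (w : List Char) : Prop :=
  ∀ c : Char, d.get? c = if w.count c = 0 then none else some ((w.count c : Int))

-- get? after erase (no such lemma in the prelude)
theorem pv_find?_filter_ne {ν : Type} (l : List (Char × ν)) (k k' : Char) :
    List.find? (fun p => p.1 == k') (l.filter (fun p => !(p.1 == k))) =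
      if k' = k then none else List.find? (fun p => p.1 == k') l := by
  by_cases hkk : k' = k
  · subst hkk
    rw [if_pos rfl, List.find?_eq_none]
    intro x hx
    simpa using (List.mem_filter.1 hx).2
  · rw [if_neg hkk]
    induction l with
    | nil => simp
    | cons a l ih =>
      rw [List.filter_cons]
      by_cases hak : a.1 = k
      · simp only [show (a.1 == k) = true by simp [hak], Bool.not_true, Bool.false_eq_true,
          if_false]
        rw [ih, List.find?_cons_of_neg (by simp [hak]; exact Ne.symm hkk)]
      · simp only [show (a.1 == k) = false by simp [hak], Bool.not_false, if_true]
        by_cases hak' : a.1 = k'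
        · rw [List.find?_cons_of_pos (by simp [hak']), List.find?_cons_of_pos (by simp [hak'])]
        · rw [List.find?_cons_of_neg (by simp [hak']), List.find?_cons_of_neg (by simp [hak']), ih]

theorem pv_get?_erase (d : PySem.Dict Char Int) (k k' : Char) :
    (d.erase k).get? k' = if k' = k then none else d.get? k' := by
  cases d with
  | mk items =>
    simp only [PySem.Dict.erase, PySem.Dict.get?, pv_find?_filter_ne]
    split <;> rfl

theorem pv_cinv_counter (l : List Char) : pvCInv (PySem.Dict.counter l) l := by
  intro c
  by_cases h : l.count c = 0
  · have hc : (PySem.Dict.counter l).contains c = false := by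
      rw [PySem.Dict.contains_counter]
      simpa [List.contains_iff_mem, ← List.count_pos_iff] using h
    simp [h, (PySem.Dict.get?_eq_none_iff_contains _ _).2 hc]
  · have hc : (PySem.Dict.counter l).contains c = true := by
      rw [PySem.Dict.contains_counter]
      simpa [List.contains_iff_mem, ← List.count_pos_iff] using Nat.pos_of_ne_zero h
    cases hg : (PySem.Dict.counter l).get? c with
    | none => exact absurd ((PySem.Dict.get?_eq_none_iff_contains _ _).1 hg) (by simp [hc])
    | some v =>
      have := PySem.Dict.getD_counter l c
      rw [PySem.Dict.getD_eq_get?_getD, hg] at this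
      simp only [Option.getD_some] at this
      simp [h, this]

theorem pv_dictEq_iff (d1 d2 : PySem.Dict Char Int) (l1 l2 : List Char)
    (h1 : pvCInv d1 l1) (h2 : pvCInv d2 l2) :
    pvDictEq d1 d2 = true ↔ l1.Perm l2 := by
  rw [List.perm_iff_count]
  constructor
  · intro h c
    simp only [pvDictEq, Bool.and_eq_true, List.all_eq_true, beq_iff_eq] at h
    have hg : d1.get? c = d2.get? c := by
      by_cases hm1 : c ∈ d1.keys
      · exact (h.1 c hm1).symm
      · by_cases hm2 : c ∈ d2.keys
        · exact (h.2 c hm2)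
        · rw [(PySem.Dict.get?_eq_none_iff_not_mem_keys _ _).2 hm1,
              (PySem.Dict.get?_eq_none_iff_not_mem_keys _ _).2 hm2]
    rw [h1 c, h2 c] at hg
    by_cases e1 : l1.count c = 0 <;> by_cases e2 : l2.count c = 0 <;>
      (simp [e1, e2] at hg ⊢) <;> omega
  · intro h
    have hg : ∀ c, d1.get? c = d2.get? c := by
      intro c; rw [h1 c, h2 c, h c]
    simp [pvDictEq, List.all_eq_true, hg]

-- decrement + pop step preserves the invariant (removing the head of the window)
theorem pv_cinv_dec (cur : PySem.Dict Char Int) (a : Char) (v : List Char)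
    (h : pvCInv cur (a :: v)) :
    pvCInv (if (cur.modify a 0 (· - 1)).getD a 0 == 0
            then (cur.modify a 0 (· - 1)).erase a else cur.modify a 0 (· - 1)) v := by
  have hgetD : cur.getD a 0 = ((a :: v).count a : Int) := by
    rw [PySem.Dict.getD_eq_get?_getD, h a]
    simp [List.count_cons_self]
  have hmod : ∀ c, (cur.modify a 0 (· - 1)).get? c
      = if c = a then some ((v.count a : Int)) else cur.get? c := by
    intro c
    rw [PySem.Dict.modify, PySem.Dict.get?_insert, hgetD]
    simp [List.count_cons_self]
  have hmodD : (cur.modify a 0 (· - 1)).getD a 0 = ((v.count a : Int)) := by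
    rw [PySem.Dict.getD_eq_get?_getD, hmod a]; simp
  intro c
  rw [hmodD]
  by_cases hz : v.count a = 0
  · simp only [hz, Nat.cast_zero, beq_self_eq_true, if_true]
    rw [pv_get?_erase]
    by_cases hca : c = a
    · simp [hca, hz]
    · rw [if_neg hca, hmod c, if_neg hca, h c]
      have hac : ¬ a = c := fun e => hca e.symm
      simp [hac]
  · have : (((v.count a : Int)) == 0) = false := by
      simp [hz]
    simp only [this, Bool.false_eq_true, if_false]
    rw [hmod c]
    by_cases hca : c = a
    · simp [hca, hz]
    · rw [if_neg hca, h c]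
      have hac : ¬ a = c := fun e => hca e.symm
      simp [hac]

-- increment step preserves the invariant (appending the new last char of the window)
theorem pv_cinv_inc (cur : PySem.Dict Char Int) (b : Char) (v : List Char)
    (h : pvCInv cur v) :
    pvCInv (if cur.contains b then cur.modify b 0 (· + 1) else cur.insert b 1) (v ++ [b]) := by
  have hcount : ∀ c, (v ++ [b]).count c = v.count c + (if c = b then 1 else 0) := by
    intro c
    by_cases hz : c = b
    · subst hz; simp [List.count_append]
    · have hzb : ¬ b = c := fun e => hz e.symm
      simp [List.count_append, hz, hzb]
  by_cases hc : cur.contains b = true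
  · have hbne : v.count b ≠ 0 := by
      intro hz
      have := (PySem.Dict.get?_eq_none_iff_contains cur b).1 (by rw [h b]; simp [hz])
      simp [hc] at this
    have hgetD : cur.getD b 0 = ((v.count b : Int)) := by
      rw [PySem.Dict.getD_eq_get?_getD, h b]; simp [hbne]
    intro c
    rw [if_pos hc, PySem.Dict.modify, PySem.Dict.get?_insert, hgetD, hcount c]
    by_cases hcb : c = b
    · simp [hcb]
    · simp [hcb, h c]
  · have hbz : v.count b = 0 := by
      by_contra hz
      have : cur.get? b = none := (PySem.Dict.get?_eq_none_iff_contains cur b).2 (by simpa using hc)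
      rw [h b] at this; simp [hz] at this
    intro c
    rw [if_neg hc, PySem.Dict.get?_insert, hcount c]
    by_cases hcb : c = b
    · simp [hcb, hbz]
    · simp [hcb, h c]

-- window head / extension
theorem pv_win_head (t : List Char) (start m : Nat) (hm : 1 ≤ m) (hs : start < t.length) :
    pvWin t start m = t.getD start ' ' :: pvWin t (start + 1) (m - 1) := by
  unfold pvWin
  obtain ⟨m', rfl⟩ : ∃ m', m = m' + 1 := ⟨m - 1, by omega⟩
  rw [List.drop_eq_getElem_cons hs, List.getD_eq_getElem t ' ' hs, List.take_succ_cons]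
  simp

theorem pv_win_ext (t : List Char) (start m : Nat) (hm : 1 ≤ m) (hs : start + m < t.length) :
    pvWin t (start + 1) (m - 1) ++ [t.getD (start + m) ' '] = pvWin t (start + 1) m := by
  unfold pvWin
  obtain ⟨m', rfl⟩ : ∃ m', m = m' + 1 := ⟨m - 1, by omega⟩
  have hlt : m' < (t.drop (start + 1)).length := by simp; omega
  rw [List.take_add_one, List.getElem?_eq_getElem hlt, List.getElem_drop]
  have hgd : t.getD (start + (m' + 1)) ' ' = t[start + 1 + m'] := by
    rw [List.getD_eq_getElem t ' ' (by omega)]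
    congr 1; omega
  rw [hgd]
  simp

-- the main loop computes the filtered remaining indices
theorem pv_loopA_spec (t p : List Char) (K : Nat) :
    ∀ start endi cur pos,
      1 ≤ p.length → start + p.length ≤ t.length → endi + 1 = start + p.length →
      t.length - (start + p.length) = K →
      pvCInv cur (pvWin t start p.length) →
      pvLoopA t (PySem.Dict.counter p) cur start endi pos =
        pos ++ List.map (fun (j : Nat) => (j : Int))
          (((List.range (t.length - p.length + 1)).drop start).filter (pvPred t p)) := by
  induction K with
  | zero =>
    intro start endi cur pos hm hle hend hK hinv
    rw [pvLoopA]
    have hcond : t.length ≤ endi + 1 := by omega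
    have heq : pvDictEq (PySem.Dict.counter p) cur = pvPred t p start := by
      rw [Bool.eq_iff_iff, pv_dictEq_iff _ _ p (pvWin t start p.length) (pv_cinv_counter p) hinv]
      simp [pvPred, List.perm_comm]
    have hstart : start = t.length - p.length := by omega
    have hdrop : (List.range (t.length - p.length + 1)).drop start = [start] := by
      rw [List.range_succ, hstart, List.drop_left' (by rw [List.length_range])]
    rw [hdrop]
    simp only [dif_pos hcond, heq]
    by_cases hp : pvPred t p start = true <;> simp [hp]
  | succ K ih =>
    intro start endi cur pos hm hle hend hK hinv
    rw [pvLoopA]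
    have hcond : ¬ t.length ≤ endi + 1 := by omega
    have heq : pvDictEq (PySem.Dict.counter p) cur = pvPred t p start := by
      rw [Bool.eq_iff_iff, pv_dictEq_iff _ _ p (pvWin t start p.length) (pv_cinv_counter p) hinv]
      simp [pvPred, List.perm_comm]
    simp only [dif_neg hcond, heq]
    have hs : start < t.length := by omega
    have hinv' : pvCInv
        (if (cur.modify (t.getD start ' ') 0 (· - 1)).getD (t.getD start ' ') 0 == 0
         then (cur.modify (t.getD start ' ') 0 (· - 1)).erase (t.getD start ' ')
         else cur.modify (t.getD start ' ') 0 (· - 1)) (pvWin t (start + 1) (p.length - 1)) := by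
      apply pv_cinv_dec
      rw [← pv_win_head t start p.length hm hs]
      exact hinv
    have hend2 : endi + 1 = start + p.length := hend
    have hslt : start + p.length < t.length := by omega
    have hinv'' := pv_cinv_inc _ (t.getD (endi + 1) ' ') _ hinv'
    rw [hend2] at hinv''
    rw [pv_win_ext t start p.length hm hslt] at hinv''
    rw [ih (start + 1) (endi + 1) _ _ hm (by omega) (by omega) (by omega) (by
        rw [hend2]; exact hinv'')]
    have hsr : start < t.length - p.length + 1 := by omega
    have hdrop : (List.range (t.length - p.length + 1)).drop start
        = start :: (List.range (t.length - p.length + 1)).drop (start + 1) := by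
      rw [List.drop_eq_getElem_cons (by simpa using hsr)]
      simp
    rw [hdrop, List.filter_cons]
    by_cases hp : pvPred t p start = true <;> simp [hp]

-- B unfolded to the same filtered index list (nonempty pattern fitting in the text)
theorem pv_alt_eq (text pattern : String) (hp : pattern.toList ≠ [])
    (hle : pattern.toList.length ≤ text.toList.length) :
    get_all_anagram_positions_alt text pattern =
      List.map (fun (j : Nat) => (j : Int))
        ((List.range (text.toList.length - pattern.toList.length + 1)).filter
          (pvPred text.toList pattern.toList)) := by
  unfold get_all_anagram_positions_alt
  rw [if_neg hp]
  dsimp only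
  have hcast : (text.toList.length : Int) - (pattern.toList.length : Int) + 1
      = ((text.toList.length - pattern.toList.length + 1 : Nat) : Int) := by
    push_cast [Nat.sub_add_cancel]
    omega
  rw [hcast, PySem.List.pyRange_zero_natCast, List.filter_map]
  refine congrArg _ ?_
  apply List.filter_congr
  intro j _
  simp only [Function.comp]
  rw [PySem.List.slice_natCast_add]
  rw [show ∀ b1 b2 : Bool, b1 = b2 ↔ (b1 = true ↔ b2 = true) from fun b1 b2 => by
    cases b1 <;> cases b2 <;> simp]
  rw [decide_eq_true_iff, pvPred, decide_eq_true_iff,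
    PySem.List.sorted_id_eq_sorted_id_iff_perm]
  exact Iff.rfl

-- ===== VERDICT (by name: the statement is the Claim_ definition above) =====
theorem get_all_anagram_positions_spec : Claim_equal_get_all_anagram_positions := by
  intro text pattern _
  unfold Spec_get_all_anagram_positions
  unfold get_all_anagram_positions
  by_cases hp : pattern.toList = []
  · simp [hp, get_all_anagram_positions_alt]
  · by_cases hlt : text.toList.length < pattern.toList.length
    · rw [if_pos (Or.inl hlt)]
      unfold get_all_anagram_positions_alt
      rw [if_neg hp]
      dsimp only
      have hlt' : (text.toList.length : Int) < (pattern.toList.length : Int) := by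
        exact_mod_cast hlt
      have hempty : PySem.List.pyRange 0 ((text.toList.length : Int) - (pattern.toList.length : Int) + 1) = [] := by
        simp only [PySem.List.pyRange, if_neg (by omega : ¬ ((0:Int) < (text.toList.length : Int) - (pattern.toList.length : Int) + 1)), one_ne_zero, if_false, if_pos (by omega : (0:Int) < 1)]
        simp
      rw [hempty]
      simp
    · have hle : pattern.toList.length ≤ text.toList.length := by omega
      have hm : 1 ≤ pattern.toList.length := by
        cases h : pattern.toList with
        | nil => exact absurd h hp
        | cons a l => simp
      rw [if_neg (by rw [not_or]; exact ⟨by omega, hp⟩)]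
      have hslice : PySem.List.slice text.toList (some 0) (some (((pattern.toList.length : Int) - 1) + 1))
          = pvWin text.toList 0 pattern.toList.length := by
        have : ((pattern.toList.length : Int) - 1) + 1 = ((pattern.toList.length : Nat) : Int) := by ring
        rw [this]
        rw [show ((0:Int)) = ((0:Nat):Int) from rfl, PySem.List.slice_natCast]
        simp [pvWin]
      rw [hslice]
      rw [pv_loopA_spec text.toList pattern.toList (text.toList.length - pattern.toList.length)
        0 (pattern.toList.length - 1) _ [] hm (by omega) (by omega) (by omega)
        (pv_cinv_counter _)]
      rw [pv_alt_eq text pattern hp hle]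
      simp
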